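-- pv_equiv track=rewrite | github.com/HuangYuhao-sysu/CS61A-coding | mentor01-done-20220821.py | mario_number
-- ===== SOURCE A (Python) =====
-- def mario_number(level):
--     """
--     Return the number of ways that Mario can traverse the
--     level, where Mario can either hop by one digit or two
--     digits each turn. A level is defined as being an integer
--     with digits where a 1 is something Mario can step on and 0
--     is
--     something Mario cannot step on.
--     >>> mario_number(10101)
--     1
--     >>> mario_number(11101)
--     2
--     >>> mario_number(100101)
--     0
--     """
--     last1, left1 = level%10, level//10  # 1001 -> 1, 100
--     last2, left2 = left1%10, left1//10  # 100  -> 0, 10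
--     last3        = left2%10             # 10   -> 0
--     if level == 1:
--         return 1
--     elif (last3, last2) == (0, 0):
--         return 0
--     elif (last3, last2) == (0, 1):
--         return mario_number(left1)
--     elif (last3, last2) == (1, 0):
--         return mario_number(left2)
--     elif (last3, last2) == (1, 1):
--         return 2*mario_number(left2)
--     else:
--         return 0
-- ===== SOURCE B (Python) =====
-- def mario_number(level):
--     result = 1
--     while level != 1:
--         d1 = (level // 10) % 10
--         d2 = (level // 100) % 10
--         if (d2, d1) == (0, 1):
--             level //= 10
--         elif (d2, d1) == (1, 0):
--             level //= 100
--         elif (d2, d1) == (1, 1):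
--             result *= 2
--             level //= 100
--         else:
--             return 0
--     return result
-- ===== Notes on version B (the rewrite author's own statement) =====
-- stated objective: alternative
-- what changed: Replaced A's recursion (with a 2x multiplication applied on the way back up) by an iterative while-loop that strips digits off the level with a multiplicative accumulator and returns the accumulator when the level reaches 1.
import Mathlib
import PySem

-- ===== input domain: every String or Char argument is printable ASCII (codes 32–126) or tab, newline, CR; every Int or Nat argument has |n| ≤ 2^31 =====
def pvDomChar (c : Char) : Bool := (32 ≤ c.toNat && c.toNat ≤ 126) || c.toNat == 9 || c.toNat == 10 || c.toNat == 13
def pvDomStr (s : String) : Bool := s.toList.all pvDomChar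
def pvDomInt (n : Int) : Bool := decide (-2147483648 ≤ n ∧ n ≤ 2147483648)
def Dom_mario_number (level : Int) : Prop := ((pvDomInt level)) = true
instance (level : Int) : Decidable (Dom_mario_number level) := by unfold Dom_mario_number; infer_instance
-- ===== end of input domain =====

-- B replaces A's recursion by an iterative digit-stripping loop with a multiplicative accumulator (objective: alternative decomposition, same cost).

-- termination helpers for both ports (cited by name in decreasing_by)
theorem pvDec1 (level : Int) (h : PySem.Int.mod (PySem.Int.floordiv level 10) 10 = 1) :
    (PySem.Int.floordiv level 10).natAbs < level.natAbs := by
  rw [PySem.Int.floordiv_eq_ediv_of_pos (by norm_num)] at *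
  rw [PySem.Int.mod_eq_emod_of_pos (by norm_num)] at h
  omega

theorem pvDec2 (level : Int)
    (h : PySem.Int.mod (PySem.Int.floordiv (PySem.Int.floordiv level 10) 10) 10 = 1) :
    (PySem.Int.floordiv (PySem.Int.floordiv level 10) 10).natAbs < level.natAbs := by
  rw [PySem.Int.floordiv_eq_ediv_of_pos (by norm_num)] at *
  rw [PySem.Int.floordiv_eq_ediv_of_pos (by norm_num)] at *
  rw [PySem.Int.mod_eq_emod_of_pos (by norm_num)] at h
  omega

theorem pvDec3 (level : Int) (h : PySem.Int.mod (PySem.Int.floordiv level 100) 10 = 1) :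
    (PySem.Int.floordiv level 100).natAbs < level.natAbs := by
  rw [PySem.Int.floordiv_eq_ediv_of_pos (by norm_num)] at *
  rw [PySem.Int.mod_eq_emod_of_pos (by norm_num)] at h
  omega

-- ===== PORT A =====
def mario_number (level : Int) : Int :=
  let left1 := PySem.Int.floordiv level 10
  let last2 := PySem.Int.mod left1 10
  let left2 := PySem.Int.floordiv left1 10
  let last3 := PySem.Int.mod left2 10
  if level = 1 then 1
  else if last3 = 0 ∧ last2 = 0 then 0
  else if last3 = 0 ∧ last2 = 1 then mario_number left1
  else if last3 = 1 ∧ last2 = 0 then mario_number left2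
  else if last3 = 1 ∧ last2 = 1 then 2 * mario_number left2
  else 0
termination_by level.natAbs
decreasing_by
  · rename_i h; exact pvDec1 level h.2
  · rename_i h; exact pvDec2 level h.1
  · rename_i h; exact pvDec2 level h.1

-- ===== PORT B =====
def marioLoop (result level : Int) : Int :=
  if level = 1 then result
  else
    let d1 := PySem.Int.mod (PySem.Int.floordiv level 10) 10
    let d2 := PySem.Int.mod (PySem.Int.floordiv level 100) 10
    if d2 = 0 ∧ d1 = 1 then marioLoop result (PySem.Int.floordiv level 10)
    else if d2 = 1 ∧ d1 = 0 then marioLoop result (PySem.Int.floordiv level 100)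
    else if d2 = 1 ∧ d1 = 1 then marioLoop (2 * result) (PySem.Int.floordiv level 100)
    else 0
termination_by level.natAbs
decreasing_by
  · rename_i h; exact pvDec1 level h.2
  · rename_i h; exact pvDec3 level h.1
  · rename_i h; exact pvDec3 level h.1

def mario_number_alt (level : Int) : Int := marioLoop 1 level

-- ===== PRECONDITION & SPEC =====
def Spec_mario_number (level : Int) (out : Int) : Prop := out = mario_number_alt level
instance (level : Int) (out : Int) : Decidable (Spec_mario_number level out) := by unfold Spec_mario_number; infer_instance

-- ===== CLAIM (what is proved, stated in full; the proofs are below) =====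
def Claim_equal_mario_number : Prop := ∀ (level : Int), Dom_mario_number level → Spec_mario_number level (mario_number level)

-- ===== LEMMAS AND PROOFS =====

theorem marioLoop_eq (result level : Int) :
    marioLoop result level = result * mario_number level := by
  induction result, level using marioLoop.induct with
  | case1 result =>
    rw [marioLoop, mario_number]; norm_num
  | case2 result level hne d1 d2 hc ih =>
    have e1 : d1 = PySem.Int.mod (PySem.Int.floordiv level 10) 10 := rfl
    have e2 : d2 = PySem.Int.mod (PySem.Int.floordiv level 100) 10 := rfl
    rw [e1, e2] at hc
    rw [marioLoop, mario_number]
    simp only [PySem.Int.floordiv_eq_ediv_of_pos (by norm_num : (0:Int) < 10),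
      PySem.Int.floordiv_eq_ediv_of_pos (by norm_num : (0:Int) < 100),
      PySem.Int.mod_eq_emod_of_pos (by norm_num : (0:Int) < 10), if_neg hne] at hc ih ⊢
    have hdd : level / 10 / 10 = level / 100 := by omega
    rw [hdd]
    split_ifs <;> first | exact ih | (exfalso; omega)
  | case3 result level hne d1 d2 hn1 hc ih =>
    have e1 : d1 = PySem.Int.mod (PySem.Int.floordiv level 10) 10 := rfl
    have e2 : d2 = PySem.Int.mod (PySem.Int.floordiv level 100) 10 := rfl
    rw [e1, e2] at hn1 hc
    rw [marioLoop, mario_number]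
    simp only [PySem.Int.floordiv_eq_ediv_of_pos (by norm_num : (0:Int) < 10),
      PySem.Int.floordiv_eq_ediv_of_pos (by norm_num : (0:Int) < 100),
      PySem.Int.mod_eq_emod_of_pos (by norm_num : (0:Int) < 10), if_neg hne] at hn1 hc ih ⊢
    have hdd : level / 10 / 10 = level / 100 := by omega
    rw [hdd]
    split_ifs <;> first | exact ih | (exfalso; omega)
  | case4 result level hne d1 d2 hn1 hn2 hc ih =>
    have e1 : d1 = PySem.Int.mod (PySem.Int.floordiv level 10) 10 := rfl
    have e2 : d2 = PySem.Int.mod (PySem.Int.floordiv level 100) 10 := rfl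
    rw [e1, e2] at hn1 hn2 hc
    rw [marioLoop, mario_number]
    simp only [PySem.Int.floordiv_eq_ediv_of_pos (by norm_num : (0:Int) < 10),
      PySem.Int.floordiv_eq_ediv_of_pos (by norm_num : (0:Int) < 100),
      PySem.Int.mod_eq_emod_of_pos (by norm_num : (0:Int) < 10), if_neg hne] at hn1 hn2 hc ih ⊢
    have hdd : level / 10 / 10 = level / 100 := by omega
    rw [hdd]
    split_ifs <;> first | (exfalso; omega) | (rw [ih]; ring)
  | case5 result level hne d1 d2 hn1 hn2 hn3 =>
    have e1 : d1 = PySem.Int.mod (PySem.Int.floordiv level 10) 10 := rfl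
    have e2 : d2 = PySem.Int.mod (PySem.Int.floordiv level 100) 10 := rfl
    rw [e1, e2] at hn1 hn2 hn3
    rw [marioLoop, mario_number]
    simp only [PySem.Int.floordiv_eq_ediv_of_pos (by norm_num : (0:Int) < 10),
      PySem.Int.floordiv_eq_ediv_of_pos (by norm_num : (0:Int) < 100),
      PySem.Int.mod_eq_emod_of_pos (by norm_num : (0:Int) < 10), if_neg hne] at hn1 hn2 hn3 ⊢
    have hdd : level / 10 / 10 = level / 100 := by omega
    rw [hdd]
    split_ifs <;> first | (exfalso; omega) | ring

-- ===== VERDICT (by name: the statement is the Claim_ definition above) =====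
theorem mario_number_spec : Claim_equal_mario_number := by
  intro level _
  unfold Spec_mario_number mario_number_alt
  rw [marioLoop_eq, one_mul]
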